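-- pv_equiv track=rewrite | github.com/vk3heg/pygate | admin_panel.py | search_in_log
-- ===== SOURCE A (Python) =====
-- from typing import Optional, List
--
-- def search_in_log(lines: List[str], search_term: str, start_from: int = 0) -> int:
--     """Search for term in log lines, return line number or -1 if not found"""
--     search_term = search_term.lower()
--
--     for i in range(start_from, len(lines)):
--         if search_term in lines[i].lower():
--             return i
--
--     # If not found from start_from onwards, search from beginning
--     for i in range(0, start_from):
--         if search_term in lines[i].lower():
--             return i
--
--     return -1
-- ===== SOURCE B (Python) =====
-- def search_in_log(lines, search_term, start_from=0):
--     """Filter-then-select: collect all matching indices in one enumerate pass,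
--     then pick the first one at or after start_from, else the first one overall."""
--     term = search_term.lower()
--     matches = [i for i, line in enumerate(lines) if term in line.lower()]
--     for i in matches:
--         if i >= start_from:
--             return i
--     return matches[0] if matches else -1
-- ===== Notes on version B (the rewrite author's own statement) =====
-- stated objective: alternative
-- what changed: Replaces A's two index-range scans with early return by a filter-then-select decomposition: one enumerate pass builds the list of all matching indices, then a separate selection picks the first match at or after start_from, falling back to the first match overall.
-- outside the precondition, e.g. on search_in_log(['error', 'boom'], 'boom', -1): A returns -1, B returns 1; on search_in_log(['a match'], 'match', 3): A returns 0, B returns 0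
import Mathlib
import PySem

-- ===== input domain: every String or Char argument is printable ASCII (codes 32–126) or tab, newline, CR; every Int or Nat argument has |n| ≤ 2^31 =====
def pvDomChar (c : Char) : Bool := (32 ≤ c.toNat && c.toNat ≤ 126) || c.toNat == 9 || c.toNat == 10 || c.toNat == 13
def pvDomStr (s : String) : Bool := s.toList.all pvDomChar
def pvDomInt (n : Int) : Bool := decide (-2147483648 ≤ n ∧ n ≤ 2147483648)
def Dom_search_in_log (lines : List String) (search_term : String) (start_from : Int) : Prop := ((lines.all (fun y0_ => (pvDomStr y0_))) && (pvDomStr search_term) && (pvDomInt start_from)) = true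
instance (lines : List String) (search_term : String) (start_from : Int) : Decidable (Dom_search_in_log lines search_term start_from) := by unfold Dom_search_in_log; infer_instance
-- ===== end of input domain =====

-- B replaces A's two early-return index scans by a filter-then-select decomposition (one enumerate pass collecting all matching indices, then a separate selection); alternative structure, same cost.


-- ===== PORT A =====
-- A's 'for i in range(a, b): …' with early return: an index loop counting up by 1
-- (fuel = number of remaining range elements, exactly Python's lazy range).
-- 'none' on a bad index stands for IndexError (excluded by Pre_).
def pvLoopA (lines : List String) (term : String) : Nat → Int → Option Int
  | 0, _ => none
  | fuel + 1, i =>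
    match PySem.List.pyGet? lines i with
    | none => none
    | some s => if PySem.Str.isIn term (PySem.Str.lower s) then some i else pvLoopA lines term fuel (i + 1)

def search_in_log (lines : List String) (search_term : String) (start_from : Int) : Int :=
  let term := PySem.Str.lower search_term
  match pvLoopA lines term ((lines.length - start_from).toNat) start_from with
  | some i => i
  | none =>
    match pvLoopA lines term (start_from - 0).toNat 0 with
    | some i => i
    | none => -1

-- ===== PORT B =====
def search_in_log_alt (lines : List String) (search_term : String) (start_from : Int) : Int :=
  let term := PySem.Str.lower search_term
  let ms := (PySem.List.enumerate lines 0).filterMap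
    (fun p => if PySem.Str.isIn term (PySem.Str.lower p.2) then some p.1 else none)
  match ms.find? (fun i => decide (start_from ≤ i)) with
  | some i => i
  | none => match ms with
    | [] => -1
    | i :: _ => i

-- ===== PRECONDITION & SPEC =====
-- Pre_ restricts start_from to the natural domain [0, len(lines)]: above it A raises
-- IndexError unless some line ms (then both return that same first match), and a
-- negative start_from is outside the natural domain of a starting line number — Python's
-- negative-index wraparound then makes A scan the tail and possibly return a negative index.
def Pre_search_in_log (lines : List String) (search_term : String) (start_from : Int) : Prop :=
  0 ≤ start_from ∧ start_from ≤ (lines.length : Int)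
instance (lines : List String) (search_term : String) (start_from : Int) : Decidable (Pre_search_in_log lines search_term start_from) := by unfold Pre_search_in_log; infer_instance
def pvWitness_search_in_log : List String × String × Int := (["error: boom", "ok"], "ERROR", 1)

def Spec_search_in_log (lines : List String) (search_term : String) (start_from : Int) (out : Int) : Prop := out = search_in_log_alt lines search_term start_from
instance (lines : List String) (search_term : String) (start_from : Int) (out : Int) : Decidable (Spec_search_in_log lines search_term start_from out) := by unfold Spec_search_in_log; infer_instance

-- ===== CLAIM (what is proved, stated in full; the proofs are below) =====
def Claim_equal_search_in_log : Prop := ∀ (lines : List String) (search_term : String) (start_from : Int), Dom_search_in_log lines search_term start_from → Pre_search_in_log lines search_term start_from → Spec_search_in_log lines search_term start_from (search_in_log lines search_term start_from)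

-- ===== LEMMAS AND PROOFS =====

-- A's fuel loop over in-range indices equals find? over the materialized range.
theorem pvLoopA_eq_find? (lines : List String) (term : String) (fuel : Nat) (i : Int)
    (h : ∀ j : Int, i ≤ j → j < i + fuel → (PySem.List.pyGet? lines j).isSome) :
    pvLoopA lines term fuel i
      = (PySem.List.pyRange i (i + fuel) 1).find? (fun j => ((PySem.List.pyGet? lines j).map (fun s => PySem.Str.isIn term (PySem.Str.lower s))).getD false) := by
  induction fuel generalizing i with
  | zero => simp [pvLoopA]
  | succ n ih =>
    have hcons := PySem.List.pyRange_one_cons (a := i) (b := i + (n + 1 : Nat)) (by push_cast; omega)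
    rw [hcons]
    have htail : i + ((n : Nat) + 1 : Nat) = (i + 1) + (n : Nat) := by push_cast; omega
    have hi : (PySem.List.pyGet? lines i).isSome := h i le_rfl (by push_cast; omega)
    obtain ⟨s, hs⟩ := Option.isSome_iff_exists.mp hi
    simp only [pvLoopA, List.find?_cons, hs, Option.map_some, Option.getD_some]
    cases hcase : PySem.Str.isIn term (PySem.Str.lower s) with
    | true => rfl
    | false =>
      dsimp only
      rw [htail, ih (i + 1) (fun j h1 h2 => h j (by omega) (by push_cast at h2 ⊢; omega))]
      simp

-- head? of a keep-the-element filterMap is find?.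
theorem head?_filterMap_ite {α : Type} (f : α → Bool) (ns : List α) :
    (ns.filterMap (fun j => if f j then some j else none)).head? = ns.find? f := by
  induction ns with
  | nil => rfl
  | cons a t ih =>
    by_cases hfa : f a = true
    · simp [List.filterMap_cons, List.find?_cons, hfa]
    · simp only [Bool.not_eq_true] at hfa
      simp [List.filterMap_cons, List.find?_cons, hfa, ih]

-- find? agreement when predicates agree on members.
theorem find?_congr_mem {α : Type} (p q : α → Bool) (ns : List α)
    (h : ∀ x ∈ ns, p x = q x) : ns.find? p = ns.find? q := by
  induction ns with
  | nil => rfl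
  | cons a t ih =>
    have ha := h a (List.mem_cons_self)
    by_cases hp : p a = true
    · simp [List.find?_cons, hp, ha ▸ hp]
    · simp only [Bool.not_eq_true] at hp
      have hq : q a = false := ha ▸ hp
      simp [List.find?_cons, hp, hq, ih (fun x hx => h x (List.mem_cons_of_mem _ hx))]

-- in-range pyGet? is some, and the looked-up predicate equals the pyGetD form.
theorem pred_eq_on_range (lines : List String) (term : String) (j : Int)
    (h0 : 0 ≤ j) (hl : j < (lines.length : Int)) :
    ((PySem.List.pyGet? lines j).map (fun s => PySem.Str.isIn term (PySem.Str.lower s))).getD false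
      = PySem.Str.isIn term (PySem.Str.lower (PySem.List.pyGetD lines j "")) := by
  have hs : (PySem.List.pyGet? lines j).isSome := by
    rw [Option.isSome_iff_ne_none]
    intro hnone
    rw [PySem.List.pyGet?_eq_none_iff, PySem.Raise.InRange] at hnone
    omega
  obtain ⟨s, hsome⟩ := Option.isSome_iff_exists.mp hs
  have hd : PySem.List.pyGetD lines j "" = s := by
    simp [PySem.List.pyGetD, hsome]
  rw [hsome, hd]
  rfl

-- ===== VERDICT (by name: the statement is the Claim_ definition above) =====
theorem search_in_log_spec : Claim_equal_search_in_log := by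
  intro lines search_term start_from _ hpre
  obtain ⟨hlo, hhi⟩ := hpre
  unfold Spec_search_in_log search_in_log search_in_log_alt
  dsimp only
  -- abbreviations
  have hP := fun (w : Int) => pred_eq_on_range lines (PySem.Str.lower search_term) w
  -- rewrite B's ms as a filterMap over the index range
  rw [PySem.List.enumerate_eq_map_pyRange (d := "")]
  rw [List.filterMap_map]
  have hcomp : ((fun p : Int × String => if PySem.Str.isIn (PySem.Str.lower search_term) (PySem.Str.lower p.2) then some p.1 else none) ∘ fun j => (j, PySem.List.pyGetD lines j ""))
      = fun j : Int => if (fun k : Int => PySem.Str.isIn (PySem.Str.lower search_term) (PySem.Str.lower (PySem.List.pyGetD lines k ""))) j then some j else none := by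
    funext j; rfl
  rw [hcomp]
  simp only [PySem.List.len_eq]
  set f : Int → Bool := fun k => PySem.Str.isIn (PySem.Str.lower search_term) (PySem.Str.lower (PySem.List.pyGetD lines k "")) with hf
  -- split B's range at start_from
  rw [PySem.List.pyRange_one_append 0 start_from (lines.length : Int) hlo hhi, List.filterMap_append]
  -- A's loops as find? over ranges
  have hA1 : pvLoopA lines (PySem.Str.lower search_term) ((lines.length - start_from).toNat) start_from
      = (PySem.List.pyRange start_from (lines.length : Int) 1).find? f := by
    rw [pvLoopA_eq_find? lines _ _ _ (fun j hj1 hj2 => by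
      rw [Option.isSome_iff_ne_none]
      intro hnone
      rw [PySem.List.pyGet?_eq_none_iff, PySem.Raise.InRange] at hnone
      push_cast at hj2
      omega)]
    have he : start_from + (((lines.length : Int) - start_from).toNat : Int) = (lines.length : Int) := by omega
    rw [he]
    exact find?_congr_mem _ _ _ (fun j hj => by
      rw [PySem.List.mem_pyRange_one] at hj
      exact hP j (by omega) (by omega))
  have hA2 : pvLoopA lines (PySem.Str.lower search_term) (start_from - 0).toNat 0
      = (PySem.List.pyRange 0 start_from 1).find? f := by
    rw [pvLoopA_eq_find? lines _ _ 0 (fun j hj1 hj2 => by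
      rw [Option.isSome_iff_ne_none]
      intro hnone
      rw [PySem.List.pyGet?_eq_none_iff, PySem.Raise.InRange] at hnone
      push_cast at hj2
      omega)]
    have he : (0 : Int) + (((start_from - 0).toNat : Int)) = start_from := by omega
    rw [he]
    exact find?_congr_mem _ _ _ (fun j hj => by
      rw [PySem.List.mem_pyRange_one] at hj
      exact hP j (by omega) (by omega))
  rw [hA1, hA2]
  -- B's selection over the split ms
  set M1 := (PySem.List.pyRange 0 start_from 1).filterMap (fun j => if f j then some j else none) with hM1
  set M2 := (PySem.List.pyRange start_from (lines.length : Int) 1).filterMap (fun j => if f j then some j else none) with hM2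
  have hmemM1 : ∀ x ∈ M1, x < start_from := by
    intro x hx
    rw [hM1, List.mem_filterMap] at hx
    obtain ⟨j, hj, hjx⟩ := hx
    rw [PySem.List.mem_pyRange_one] at hj
    by_cases hfj : f j = true
    · simp [hfj] at hjx; omega
    · simp only [Bool.not_eq_true] at hfj; simp [hfj] at hjx
  have hmemM2 : ∀ x ∈ M2, start_from ≤ x := by
    intro x hx
    rw [hM2, List.mem_filterMap] at hx
    obtain ⟨j, hj, hjx⟩ := hx
    rw [PySem.List.mem_pyRange_one] at hj
    by_cases hfj : f j = true
    · simp [hfj] at hjx; omega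
    · simp only [Bool.not_eq_true] at hfj; simp [hfj] at hjx
  have hfind1 : M1.find? (fun i => decide (start_from ≤ i)) = none := by
    rw [List.find?_eq_none]
    intro x hx
    simpa using not_le.mpr (hmemM1 x hx)
  have hfind2 : M2.find? (fun i => decide (start_from ≤ i)) = M2.head? := by
    cases hM : M2 with
    | nil => rfl
    | cons a t =>
      have ha : start_from ≤ a := hmemM2 a (by rw [hM]; exact List.mem_cons_self)
      simp [List.find?_cons, ha]
  rw [List.find?_append, hfind1, Option.none_or, hfind2,
      head?_filterMap_ite f (PySem.List.pyRange start_from (lines.length : Int) 1)]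
  cases hc2 : (PySem.List.pyRange start_from (lines.length : Int) 1).find? f with
  | some i => rfl
  | none =>
    -- suffix has no match: M2 = [], B falls back to M1's head, A to the prefix find?
    have hM2nil : M2 = [] := by
      apply List.head?_eq_none_iff.mp
      rw [hM2, head?_filterMap_ite f, hc2]
    rw [hM2nil, List.append_nil]
    dsimp only
    cases hc1 : (PySem.List.pyRange 0 start_from 1).find? f with
    | some i =>
      have : M1.head? = some i := by rw [hM1, head?_filterMap_ite f, hc1]
      cases hM : M1 with
      | nil => rw [hM] at this; simp at this
      | cons a t => rw [hM] at this; simp at this; rw [this]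
    | none =>
      have : M1.head? = none := by rw [hM1, head?_filterMap_ite f, hc1]
      have hM : M1 = [] := List.head?_eq_none_iff.mp this
      rw [hM]
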